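-- pv_equiv track=rewrite | github.com/ranger2204/IntPreps | 202202/rot_dis.py | find_ops
-- ===== SOURCE A (Python) =====
-- def find_ops(l1, l2):
--
--     def recur(l1: list, l2:list, ops:int=0):
--         if len(l1) == 0:
--             return ops
--         else:
--             f = l2[0]
--             f_index = l1.index(f)
--             if f_index != 0:
--                 d = f_index
--                 l = len(l1)
--                 new_l1 = [0 for i in range(l)]
--                 for i in range(l):
--                     new_index =   ((i - d) + l)%l
--                     new_l1[new_index] = l1[i]
--                 ops += d
--
--                 return recur(new_l1[1:], l2[1:], ops+1)
--             else:
--                 return recur(l1[1:], l2[1:], ops+1)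
--
--     return recur(l1, l2)
-- ===== SOURCE B (Python) =====
-- def find_ops(l1, l2):
--     n = len(l1)
--     alive = [True] * n
--     ops = 0
--     p = 0
--     for k in range(n):
--         f = l2[k]
--         q = p
--         d = 0
--         for _ in range(n):
--             if alive[q] and l1[q] == f:
--                 break
--             if alive[q]:
--                 d += 1
--             q = (q + 1) % n
--         else:
--             raise ValueError("%r is not in list" % (f,))
--         ops += d + 1
--         alive[q] = False
--         p = (q + 1) % n
--     return ops
-- ===== Notes on version B (the rewrite author's own statement) =====
-- stated objective: faster
-- what changed: B never rebuilds or rotates lists: it keeps a boolean alive-mask over the original positions of l1 plus a cyclic front pointer, and for each target scans forward from the pointer counting surviving elements, instead of A's recursion that allocates a fully rotated copy of the list at every step.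
import Mathlib
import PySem

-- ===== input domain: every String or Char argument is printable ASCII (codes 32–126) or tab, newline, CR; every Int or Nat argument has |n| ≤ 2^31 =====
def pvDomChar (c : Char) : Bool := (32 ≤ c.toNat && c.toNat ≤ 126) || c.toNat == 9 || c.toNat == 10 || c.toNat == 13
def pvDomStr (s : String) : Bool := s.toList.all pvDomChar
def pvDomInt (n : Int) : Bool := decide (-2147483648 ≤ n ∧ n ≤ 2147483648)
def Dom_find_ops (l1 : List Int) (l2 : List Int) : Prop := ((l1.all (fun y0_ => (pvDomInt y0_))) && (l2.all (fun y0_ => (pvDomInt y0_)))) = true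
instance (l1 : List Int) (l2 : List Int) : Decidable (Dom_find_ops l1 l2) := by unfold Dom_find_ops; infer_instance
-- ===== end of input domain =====

-- B replaces A's rotate-copy-and-recurse scheme by an alive-mask over the original
-- positions of l1 with a cyclic front pointer (no list is ever rebuilt); same results.

-- ===== PORT A =====
-- helper for A's inner rotation loop:
--   new_l1 = [0 for i in range(l)]; for i in range(l): new_l1[((i-d)+l)%l] = l1[i]
-- i runs over 0..l-1 so l1[i] is in range (getD); the computed index is in [0,l)
-- (PySem.Int.mod with positive modulus), so .toNat and .set are exact.
def rotBuild (l1 : List Int) (d : Nat) : List Int :=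
  (List.range l1.length).foldl
    (fun acc i =>
      acc.set (PySem.Int.mod (Int.ofNat i - (d : Int) + (l1.length : Int)) (l1.length : Int)).toNat
        (l1.getD i 0))
    (List.replicate l1.length 0)

theorem foldl_set_length {α β : Type} (l : List β) (F : List α → β → List α)
    (hF : ∀ acc b, (F acc b).length = acc.length) :
    ∀ init : List α, (l.foldl F init).length = init.length := by
  induction l with
  | nil => intro init; rfl
  | cons a t ih => intro init; rw [List.foldl_cons, ih, hF]

theorem rotBuild_length (l1 : List Int) (d : Nat) : (rotBuild l1 d).length = l1.length := by
  unfold rotBuild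
  exact (foldl_set_length _ _ (by intro acc b; simp [List.length_set]) _).trans (by simp)

-- recur(l1, l2, ops): none = the Python raises (IndexError on l2[0] / ValueError on .index)
def findOpsRec (l1 l2 : List Int) (ops : Int) : Option Int :=
  if l1 = [] then some ops
  else
    match PySem.List.pyGet? l2 0 with
    | none => none
    | some f =>
      match PySem.List.index? l1 f with
      | none => none
      | some fi =>
        if fi ≠ 0 then
          findOpsRec (PySem.List.slice (rotBuild l1 fi) (some 1) none)
            (PySem.List.slice l2 (some 1) none) (ops + (fi : Int) + 1)
        else
          findOpsRec (PySem.List.slice l1 (some 1) none)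
            (PySem.List.slice l2 (some 1) none) (ops + 1)
termination_by l1.length
decreasing_by
  · simp [PySem.List.slice_from_one, rotBuild_length]
    cases l1 with
    | nil => simp_all
    | cons x xs => simp
  · simp [PySem.List.slice_from_one]
    cases l1 with
    | nil => simp_all
    | cons x xs => simp

def find_ops (l1 : List Int) (l2 : List Int) : Int :=
  (findOpsRec l1 l2 0).getD 0

-- ===== PORT B =====
-- inner 'for _ in range(n)' scan: from cell q, counting alive cells in d, until an
-- alive cell holding f is found (q is always < n, so getD is exact); none = ValueError.
def scanAlt (l1 : List Int) (alive : List Bool) (f : Int) : Nat → Nat → Int → Option (Nat × Int)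
  | 0, _, _ => none
  | fuel + 1, q, d =>
    if alive.getD q false && (l1.getD q 0 == f) then some (q, d)
    else scanAlt l1 alive f fuel ((q + 1) % l1.length) (if alive.getD q false then d + 1 else d)

-- one iteration of the 'for k in range(n)' loop; none = an exception already happened
def stepAlt (l1 l2 : List Int) (st : Option (List Bool × Nat × Int)) (k : Nat) :
    Option (List Bool × Nat × Int) :=
  match st with
  | none => none
  | some (alive, p, ops) =>
    match PySem.List.pyGet? l2 (k : Int) with
    | none => none
    | some f =>
      match scanAlt l1 alive f l1.length p 0 with
      | none => none
      | some (q, d) => some (alive.set q false, (q + 1) % l1.length, ops + d + 1)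

def find_ops_alt (l1 : List Int) (l2 : List Int) : Int :=
  match (List.range l1.length).foldl (stepAlt l1 l2)
      (some (List.replicate l1.length true, 0, 0)) with
  | some (_, _, ops) => ops
  | none => 0

-- ===== PRECONDITION & SPEC =====
-- Exactly the inputs on which A returns: l2 must be long enough (else IndexError on
-- l2[0]) and the prefix of l2 that gets consumed must fit, as a multiset, inside l1
-- (else ValueError from l1.index).
def Pre_find_ops (l1 : List Int) (l2 : List Int) : Prop :=
  l1.length ≤ l2.length ∧
    ∀ x ∈ l2.take l1.length, (l2.take l1.length).count x ≤ l1.count x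

instance (l1 : List Int) (l2 : List Int) : Decidable (Pre_find_ops l1 l2) := by
  unfold Pre_find_ops; infer_instance

def pvWitness_find_ops : List Int × List Int := ([2, 1, 3], [1, 3, 2, 5])

def Spec_find_ops (l1 : List Int) (l2 : List Int) (out : Int) : Prop := out = find_ops_alt l1 l2
instance (l1 : List Int) (l2 : List Int) (out : Int) : Decidable (Spec_find_ops l1 l2 out) := by
  unfold Spec_find_ops; infer_instance

-- ===== CLAIM (what is proved, stated in full; the proofs are below) =====
def Claim_equal_find_ops : Prop := ∀ (l1 : List Int) (l2 : List Int), Dom_find_ops l1 l2 → Pre_find_ops l1 l2 → Spec_find_ops l1 l2 (find_ops l1 l2)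

-- ===== LEMMAS AND PROOFS =====

-- the cells of the circular buffer, listed from front p
def posList (n p : Nat) : List Nat := (List.range n).map (fun j => (p + j) % n)

-- the surviving elements in current order: exactly the list A's recursion works on
def view (l1 : List Int) (alive : List Bool) (p : Nat) : List Int :=
  ((posList l1.length p).filter (fun q => alive.getD q false)).map (fun q => l1.getD q 0)

-- ---- rotBuild characterisation ----
theorem set_map_range {α : Type} (f : Nat → α) (n t : Nat) (x : α) :
    (List.map f (List.range n)).set t x
      = List.map (fun j => if j = t then x else f j) (List.range n) := by
  apply List.ext_getElem
  · simp
  · intro j h1 h2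
    simp only [List.length_set, List.length_map, List.length_range] at h1
    rw [List.getElem_set]
    simp only [List.getElem_map, List.getElem_range]
    by_cases hj : t = j
    · subst hj; simp
    · rw [if_neg hj, if_neg (fun h => hj h.symm)]

theorem rotBuild_aux (v : List Int) (d : Nat) (hd : d < v.length) (m : Nat) (hm : m ≤ v.length) :
    ((List.range m).foldl
      (fun acc i =>
        acc.set (PySem.Int.mod (Int.ofNat i - (d : Int) + (v.length : Int)) (v.length : Int)).toNat
          (v.getD i 0))
      (List.replicate v.length 0))
    = List.map (fun j => if (j + d) % v.length < m then v.getD ((j + d) % v.length) 0 else 0)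
        (List.range v.length) := by
  have hn : 0 < v.length := Nat.lt_of_le_of_lt (Nat.zero_le d) hd
  induction m with
  | zero =>
    simp [List.map_const']
  | succ m ih =>
    have hm' : m ≤ v.length := Nat.le_of_succ_le hm
    rw [List.range_succ, List.foldl_append, ih hm']
    have hcast : Int.ofNat m - (d : Int) + (v.length : Int) = ((m + v.length - d : Nat) : Int) := by
      have hdle : d ≤ m + v.length := Nat.le_add_left_of_le (Nat.le_of_lt hd)
      simp only [Int.ofNat_eq_natCast]
      push_cast [hdle]
      omega
    have hmod : (PySem.Int.mod (Int.ofNat m - (d : Int) + (v.length : Int)) (v.length : Int)).toNat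
        = (m + v.length - d) % v.length := by
      rw [PySem.Int.mod_eq_emod_of_pos (by exact_mod_cast hn), hcast, ← Int.natCast_mod,
        Int.toNat_natCast]
    set t := (m + v.length - d) % v.length with hT
    have htlt : t < v.length := Nat.mod_lt _ hn
    have htd : (t + d) % v.length = m := by
      rw [hT, Nat.mod_add_mod]
      have h5 : m + v.length - d + d = m + v.length := by omega
      rw [h5, Nat.add_mod_right]
      exact Nat.mod_eq_of_lt (by omega)
    simp only [List.foldl_cons, List.foldl_nil, hmod]
    rw [set_map_range]
    apply List.map_congr_left
    intro j hj
    rw [List.mem_range] at hj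
    by_cases hjt : j = t
    · subst hjt
      rw [if_pos rfl, htd, if_pos (Nat.lt_succ_self m)]
    · rw [if_neg hjt]
      have hne : (j + d) % v.length ≠ m := by
        intro hc
        apply hjt
        have h1 : (j + d) % v.length = (t + d) % v.length := by rw [hc, htd]
        have h2 : j % v.length = t % v.length := Nat.ModEq.add_right_cancel' d h1
        rwa [Nat.mod_eq_of_lt hj, Nat.mod_eq_of_lt htlt] at h2
      by_cases hlt : (j + d) % v.length < m
      · rw [if_pos hlt, if_pos (Nat.lt_succ_of_lt hlt)]
      · rw [if_neg hlt, if_neg (by omega)]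

theorem rotBuild_eq (v : List Int) (d : Nat) (hd : d < v.length) :
    rotBuild v d = v.drop d ++ v.take d := by
  have hn : 0 < v.length := Nat.lt_of_le_of_lt (Nat.zero_le d) hd
  unfold rotBuild
  rw [rotBuild_aux v d hd v.length (le_refl _)]
  apply List.ext_getElem
  · simp
    omega
  · intro j h1 h2
    simp only [List.length_map, List.length_range] at h1
    simp only [List.getElem_map, List.getElem_range]
    rw [if_pos (Nat.mod_lt _ hn)]
    have hidx : (j + d) % v.length < v.length := Nat.mod_lt _ hn
    rw [List.getD_eq_getElem v 0 hidx]
    by_cases hj : j < v.length - d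
    · rw [List.getElem_append_left (by simpa using hj)]
      rw [List.getElem_drop]
      have : (j + d) % v.length = d + j := by
        rw [Nat.add_comm j d] at *
        exact Nat.mod_eq_of_lt (by omega)
      simp [this]
    · rw [List.getElem_append_right (by simpa using hj)]
      simp only [List.getElem_take]
      have : (j + d) % v.length = j - (v.length - d) := by
        have h3 : v.length ≤ j + d := by omega
        rw [Nat.mod_eq_sub_mod h3]
        have : j + d - v.length = j - (v.length - d) := by omega
        rw [this]
        exact Nat.mod_eq_of_lt (by omega)
      simp [this]

-- ---- scan characterisation ----
-- scan along an explicit list of cells (the spec shape of scanAlt's fuel recursion)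
def scanCells (l1 : List Int) (alive : List Bool) (f : Int) : List Nat → Int → Option (Nat × Int)
  | [], _ => none
  | q :: rest, d =>
    if alive.getD q false && (l1.getD q 0 == f) then some (q, d)
    else scanCells l1 alive f rest (if alive.getD q false then d + 1 else d)

-- scan along the already-filtered (alive) cells
def scanFilt (l1 : List Int) (f : Int) : List Nat → Int → Option (Nat × Int)
  | [], _ => none
  | q :: rest, d => if l1.getD q 0 == f then some (q, d) else scanFilt l1 f rest (d + 1)

theorem scanAlt_eq_scanCells (l1 : List Int) (alive : List Bool) (f : Int) :
    ∀ (fuel : Nat) (q : Nat) (d : Int), q < l1.length →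
      scanAlt l1 alive f fuel q d
        = scanCells l1 alive f ((List.range fuel).map (fun j => (q + j) % l1.length)) d := by
  intro fuel
  induction fuel with
  | zero => intro q d _; rfl
  | succ fuel ih =>
    intro q d hq
    have hn : 0 < l1.length := Nat.lt_of_le_of_lt (Nat.zero_le q) hq
    rw [List.range_succ_eq_map, List.map_cons, List.map_map]
    show scanAlt l1 alive f (fuel + 1) q d = _
    rw [scanAlt, scanCells]
    have h0 : (q + 0) % l1.length = q := by rw [Nat.add_zero]; exact Nat.mod_eq_of_lt hq
    rw [h0]
    by_cases hc : (alive.getD q false && (l1.getD q 0 == f)) = true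
    · rw [if_pos hc, if_pos hc]
    · rw [if_neg hc, if_neg hc]
      rw [ih ((q + 1) % l1.length) _ (Nat.mod_lt _ hn)]
      congr 1
      apply List.map_congr_left
      intro j _
      show ((q + 1) % l1.length + j) % l1.length = (q + (j + 1)) % l1.length
      rw [Nat.mod_add_mod]
      congr 1
      omega

theorem scanCells_eq_scanFilt (l1 : List Int) (alive : List Bool) (f : Int) :
    ∀ (cells : List Nat) (d : Int),
      scanCells l1 alive f cells d
        = scanFilt l1 f (cells.filter (fun q => alive.getD q false)) d := by
  intro cells
  induction cells with
  | nil => intro d; rfl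
  | cons c rest ih =>
    intro d
    rw [scanCells]
    by_cases ha : alive.getD c false = true
    · have hfc : List.filter (fun q => alive.getD q false) (c :: rest)
          = c :: List.filter (fun q => alive.getD q false) rest := by
        rw [List.filter_cons, if_pos (by simpa using ha)]
      rw [hfc, scanFilt, ha]
      by_cases hv : (l1.getD c 0 == f) = true
      · rw [hv, if_pos (show ((true && true : Bool) = true) from rfl),
          if_pos (show ((true : Bool) = true) from rfl)]
      · have hv' : (l1.getD c 0 == f) = false := by
          revert hv; cases (l1.getD c 0 == f) <;> simp
        rw [hv', if_neg (show ¬((true && false : Bool) = true) by decide),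
          if_pos (show ((true : Bool) = true) from rfl),
          if_neg (show ¬((false : Bool) = true) by decide)]
        exact ih (d + 1)
    · have ha' : alive.getD c false = false := by
        revert ha; cases alive.getD c false <;> simp
      have hfc : List.filter (fun q => alive.getD q false) (c :: rest)
          = List.filter (fun q => alive.getD q false) rest := by
        rw [List.filter_cons, if_neg (by rw [ha']; exact Bool.false_ne_true)]
      rw [hfc, ha']
      have h1 : ¬((false && (l1.getD c 0 == f)) = true) := by simp
      rw [if_neg h1, if_neg (show ¬((false : Bool) = true) by decide)]
      exact ih d

theorem scanFilt_none_iff (l1 : List Int) (f : Int) :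
    ∀ (filt : List Nat) (d : Int),
      scanFilt l1 f filt d = none ↔ ∀ x ∈ filt, l1.getD x 0 ≠ f := by
  intro filt
  induction filt with
  | nil => intro d; simp [scanFilt]
  | cons a rest ih =>
    intro d
    rw [scanFilt]
    by_cases hv : (l1.getD a 0 == f) = true
    · simp only [if_pos hv]
      constructor
      · intro h; exact absurd h (by simp)
      · intro h
        exact absurd (by simpa using hv) (h a (List.mem_cons_self))
    · rw [if_neg hv]
      rw [ih (d + 1)]
      constructor
      · intro h x hx
        rcases List.mem_cons.mp hx with rfl | hx'
        · simpa using hv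
        · exact h x hx'
      · intro h x hx
        exact h x (List.mem_cons_of_mem _ hx)

theorem scanFilt_some (l1 : List Int) (f : Int) :
    ∀ (filt : List Nat) (d : Int) (q : Nat) (dres : Int),
      scanFilt l1 f filt d = some (q, dres) →
      ∃ F1 F2, filt = F1 ++ q :: F2 ∧ l1.getD q 0 = f ∧
        (∀ x ∈ F1, l1.getD x 0 ≠ f) ∧ dres = d + (F1.length : Int) := by
  intro filt
  induction filt with
  | nil => intro d q dres h; exact absurd h (by simp [scanFilt])
  | cons a rest ih =>
    intro d q dres h
    rw [scanFilt] at h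
    by_cases hv : (l1.getD a 0 == f) = true
    · rw [if_pos hv] at h
      obtain ⟨rfl, rfl⟩ : a = q ∧ d = dres := by
        constructor <;> [exact congrArg Prod.fst (Option.some.inj h);
                         exact congrArg Prod.snd (Option.some.inj h)]
      exact ⟨[], rest, rfl, by simpa using hv, by simp, by simp⟩
    · rw [if_neg hv] at h
      obtain ⟨F1, F2, hsplit, hq, hF1, hd⟩ := ih (d + 1) q dres h
      refine ⟨a :: F1, F2, by rw [hsplit]; rfl, hq, ?_, ?_⟩
      · intro x hx
        rcases List.mem_cons.mp hx with rfl | hx'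
        · simpa using hv
        · exact hF1 x hx'
      · rw [hd]
        simp only [List.length_cons]
        push_cast
        ring

-- ---- splitting a filter decomposition back to the unfiltered list ----
theorem filter_eq_append_cons {α : Type} (p : α → Bool) :
    ∀ (l F1 F2 : List α) (q : α), l.filter p = F1 ++ q :: F2 →
      ∃ C1 C2, l = C1 ++ q :: C2 ∧ C1.filter p = F1 ∧ C2.filter p = F2 ∧ p q = true := by
  intro l
  induction l with
  | nil => intro F1 F2 q h; exact absurd h (by simp)
  | cons a t ih =>
    intro F1 F2 q h
    by_cases ha : p a = true
    · rw [List.filter_cons_of_pos ha] at h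
      cases F1 with
      | nil =>
        simp only [List.nil_append] at h ⊢
        obtain ⟨rfl, hrest⟩ := List.cons.inj h
        exact ⟨[], t, rfl, rfl, hrest, ha⟩
      | cons b F1' =>
        obtain ⟨rfl, hrest⟩ := List.cons.inj h
        obtain ⟨C1, C2, rfl, hC1, hC2, hq⟩ := ih F1' F2 q hrest
        exact ⟨a :: C1, C2, rfl, by rw [List.filter_cons_of_pos ha, hC1], hC2, hq⟩
    · rw [List.filter_cons_of_neg (by simp [ha])] at h
      obtain ⟨C1, C2, rfl, hC1, hC2, hq⟩ := ih F1 F2 q h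
      exact ⟨a :: C1, C2, rfl, by rw [List.filter_cons_of_neg (by simp [ha]), hC1], hC2, hq⟩

-- ---- posList facts ----
theorem posList_length (n p : Nat) : (posList n p).length = n := by simp [posList]

theorem mem_posList_lt (n p q : Nat) (hn : 0 < n) (h : q ∈ posList n p) : q < n := by
  simp [posList] at h
  obtain ⟨j, _, rfl⟩ := h
  exact Nat.mod_lt _ hn

theorem posList_nodup (n p : Nat) : (posList n p).Nodup := by
  rcases Nat.eq_zero_or_pos n with rfl | hn
  · simp [posList]
  · apply List.Nodup.map_on _ (List.nodup_range)
    intro j1 h1 j2 h2 h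
    rw [List.mem_range] at h1 h2
    have h' : j1 % n = j2 % n := Nat.ModEq.add_left_cancel' p h
    rwa [Nat.mod_eq_of_lt h1, Nat.mod_eq_of_lt h2] at h'

theorem posList_zero (n : Nat) : posList n 0 = List.range n := by
  unfold posList
  have : ∀ j ∈ List.range n, (0 + j) % n = j := by
    intro j hj
    rw [List.mem_range] at hj
    rw [Nat.zero_add]
    exact Nat.mod_eq_of_lt hj
  rw [List.map_congr_left this, List.map_id']

theorem posList_rotate (n p m : Nat) (hp : p < n) (hm : m ≤ n) :
    posList n ((p + m) % n) = (posList n p).drop m ++ (posList n p).take m := by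
  have hn : 0 < n := Nat.lt_of_le_of_lt (Nat.zero_le p) hp
  apply List.ext_getElem
  · simp [posList_length]
    omega
  · intro j h1 h2
    rw [posList_length] at h1
    have hLHS : (posList n ((p + m) % n))[j] = (p + m + j) % n := by
      simp only [posList, List.getElem_map, List.getElem_range]
      rw [Nat.mod_add_mod]
    rw [hLHS]
    by_cases hj : j < n - m
    · rw [List.getElem_append_left (by simp [posList_length]; omega)]
      rw [List.getElem_drop]
      simp only [posList, List.getElem_map, List.getElem_range]
      congr 1
      omega
    · rw [List.getElem_append_right (by simp [posList_length]; omega)]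
      simp only [List.getElem_take, posList, List.getElem_map, List.getElem_range,
        List.length_drop, List.length_map, List.length_range]
      have heq : p + m + j = p + (j - (n - m)) + n := by omega
      rw [heq, Nat.add_mod_right]

-- ===== main loop invariant =====
theorem foldl_stepAlt_none (l1 l2 : List Int) (ks : List Nat) :
    ks.foldl (stepAlt l1 l2) none = none := by
  induction ks with
  | nil => rfl
  | cons a t ih => simpa [stepAlt] using ih

theorem loop_eq (l1 l2 : List Int) :
    ∀ (m k : Nat) (alive : List Bool) (p : Nat) (ops : Int),
      k + m = l1.length →
      alive.length = l1.length →
      p < l1.length →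
      ((posList l1.length p).filter (fun q => alive.getD q false)).length = m →
      findOpsRec (view l1 alive p) (l2.drop k) ops
        = ((List.range' k m).foldl (stepAlt l1 l2) (some (alive, p, ops))).map
            (fun st => st.2.2) := by
  intro m
  induction m with
  | zero =>
    intro k alive p ops hk hal hp hfl
    have hfilt : (posList l1.length p).filter (fun q => alive.getD q false) = [] :=
      List.length_eq_zero_iff.mp hfl
    have hview : view l1 alive p = [] := by unfold view; rw [hfilt]; rfl
    rw [hview, findOpsRec, if_pos rfl, List.range'_zero, List.foldl_nil]
    rfl
  | succ m ih =>
    intro k alive p ops hk hal hp hfl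
    have hn : 0 < l1.length := Nat.lt_of_le_of_lt (Nat.zero_le p) hp
    have hview : view l1 alive p
        = ((posList l1.length p).filter (fun q => alive.getD q false)).map
            (fun q => l1.getD q 0) := rfl
    have hvlen : (view l1 alive p).length = m + 1 := by
      rw [hview, List.length_map]; exact hfl
    have hvne : view l1 alive p ≠ [] := by
      intro hc; rw [hc] at hvlen; exact absurd hvlen (by simp)
    rw [List.range'_succ, List.foldl_cons]
    cases hgot : l2[k]? with
    | none =>
      have hget2 : PySem.List.pyGet? (l2.drop k) 0 = none := by
        rw [PySem.List.pyGet?_zero, List.getElem?_drop, Nat.add_zero, hgot]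
      have hstep : stepAlt l1 l2 (some (alive, p, ops)) k = none := by
        rw [stepAlt]; simp only [PySem.List.pyGet?_natCast, hgot]
      rw [findOpsRec, if_neg hvne]
      simp only [hget2]
      rw [hstep, foldl_stepAlt_none]
      rfl
    | some f =>
      have hget2 : PySem.List.pyGet? (l2.drop k) 0 = some f := by
        rw [PySem.List.pyGet?_zero, List.getElem?_drop, Nat.add_zero, hgot]
      have hscan : scanAlt l1 alive f l1.length p 0
          = scanFilt l1 f ((posList l1.length p).filter (fun q => alive.getD q false)) 0 := by
        rw [scanAlt_eq_scanCells l1 alive f l1.length p 0 hp, scanCells_eq_scanFilt]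
        rfl
      cases hres : scanFilt l1 f ((posList l1.length p).filter (fun q => alive.getD q false)) 0 with
      | none =>
        have hnotin := (scanFilt_none_iff l1 f _ 0).mp hres
        have hidx : PySem.List.index? (view l1 alive p) f = none := by
          rw [PySem.List.index?_eq_none_iff]
          intro hmem
          rw [hview] at hmem
          obtain ⟨x, hx, hxe⟩ := List.mem_map.mp hmem
          exact hnotin x hx hxe
        have hstep : stepAlt l1 l2 (some (alive, p, ops)) k = none := by
          rw [stepAlt]; simp only [PySem.List.pyGet?_natCast, hgot, hscan, hres]
        rw [findOpsRec, if_neg hvne]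
        simp only [hget2, hidx]
        rw [hstep, foldl_stepAlt_none]
        rfl
      | some qd =>
        obtain ⟨q, dres⟩ := qd
        obtain ⟨F1, F2, hsplit, hqf, hF1, hdres⟩ := scanFilt_some l1 f _ 0 q dres hres
        have hdres2 : dres = (F1.length : Int) := by rw [hdres, zero_add]
        obtain ⟨C1, C2, hcells, hC1, hC2, haq⟩ :=
          filter_eq_append_cons (fun q => alive.getD q false) (posList l1.length p) F1 F2 q hsplit
        have hqmem : q ∈ posList l1.length p := by
          rw [hcells]; exact List.mem_append_right _ List.mem_cons_self
        have hqlt : q < l1.length := mem_posList_lt l1.length p q hn hqmem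
        have hclen : C1.length + 1 + C2.length = l1.length := by
          have h0 := posList_length l1.length p
          rw [hcells] at h0; simp at h0; omega
        have hfiltlen : F1.length + 1 + F2.length = m + 1 := by
          have h0 := hfl
          rw [hsplit] at h0; simp at h0; omega
        have hvsplit : view l1 alive p
            = F1.map (fun q => l1.getD q 0) ++ f :: F2.map (fun q => l1.getD q 0) := by
          rw [hview, hsplit]
          simp only [List.map_append, List.map_cons, hqf]
        have hidx : PySem.List.index? (view l1 alive p) f = some F1.length := by
          rw [PySem.List.index?_eq_some_iff]
          refine ⟨F1.map (fun q => l1.getD q 0), F2.map (fun q => l1.getD q 0), hvsplit,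
            by simp, ?_⟩
          intro hmem
          obtain ⟨x, hx, hxe⟩ := List.mem_map.mp hmem
          exact hF1 x hx hxe
        have hfilt_lt : F1.length < (view l1 alive p).length := by rw [hvlen]; omega
        -- facts about the updated state
        have hgetD_ne : ∀ x, x ≠ q → (alive.set q false).getD x false = alive.getD x false := by
          intro x hx
          rw [List.getD_eq_getElem?_getD, List.getElem?_set_ne (fun h => hx h.symm),
            ← List.getD_eq_getElem?_getD]
        have hgetD_q : (alive.set q false).getD q false = false := by
          rw [List.getD_eq_getElem _ _ (by rw [List.length_set, hal]; exact hqlt)]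
          exact List.getElem_set_self _
        have hnodup : (C1 ++ q :: C2).Nodup := by rw [← hcells]; exact posList_nodup _ _
        have hqC1 : q ∉ C1 := by
          intro hmem
          exact (List.disjoint_of_nodup_append hnodup) hmem List.mem_cons_self
        have hqC2 : q ∉ C2 := by
          have h2 := (List.nodup_append.mp hnodup).2.1
          exact (List.nodup_cons.mp h2).1
        have hC1n : C1.length < l1.length := by omega
        have hq_eq : q = (p + C1.length) % l1.length := by
          have e1 : (posList l1.length p)[C1.length]? = some ((p + C1.length) % l1.length) := by
            simp [posList, hC1n]
          have e2 : (posList l1.length p)[C1.length]? = some q := by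
            rw [hcells, List.getElem?_append_right (le_refl C1.length), Nat.sub_self]
            rfl
          exact Option.some.inj (e2.symm.trans e1)
        have hrot : posList l1.length ((q + 1) % l1.length) = C2 ++ (C1 ++ [q]) := by
          have hm1 : C1.length + 1 ≤ l1.length := by omega
          have hpeq : (q + 1) % l1.length = (p + (C1.length + 1)) % l1.length := by
            rw [hq_eq, Nat.mod_add_mod, Nat.add_assoc]
          rw [hpeq, posList_rotate l1.length p (C1.length + 1) hp hm1, hcells]
          have hassoc : C1 ++ q :: C2 = (C1 ++ [q]) ++ C2 := by simp
          rw [hassoc, List.drop_left' (by simp), List.take_left' (by simp)]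
        have hfilter' : (posList l1.length ((q + 1) % l1.length)).filter
            (fun x => (alive.set q false).getD x false) = F2 ++ F1 := by
          rw [hrot, List.filter_append, List.filter_append]
          have e2 : C2.filter (fun x => (alive.set q false).getD x false) = F2 := by
            rw [← hC2]
            exact List.filter_congr (fun x hx => hgetD_ne x (fun hc => hqC2 (hc ▸ hx)))
          have e1 : C1.filter (fun x => (alive.set q false).getD x false) = F1 := by
            rw [← hC1]
            exact List.filter_congr (fun x hx => hgetD_ne x (fun hc => hqC1 (hc ▸ hx)))
          have e0 : [q].filter (fun x => (alive.set q false).getD x false) = [] := by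
            rw [List.filter_cons, if_neg (by rw [hgetD_q]; exact Bool.false_ne_true)]
            rfl
          rw [e1, e2, e0, List.append_nil]
        have hdropfi : (view l1 alive p).drop F1.length
            = f :: F2.map (fun q => l1.getD q 0) := by
          rw [hvsplit, List.drop_left' (by simp)]
        have hdrop1 : (view l1 alive p).drop (F1.length + 1)
            = F2.map (fun q => l1.getD q 0) := by
          rw [hvsplit]
          have h9 : F1.map (fun q => l1.getD q 0) ++ f :: F2.map (fun q => l1.getD q 0)
              = (F1.map (fun q => l1.getD q 0) ++ [f]) ++ F2.map (fun q => l1.getD q 0) := by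
            simp
          rw [h9, List.drop_left' (by simp)]
        have htake1 : (view l1 alive p).take F1.length = F1.map (fun q => l1.getD q 0) := by
          rw [hvsplit, List.take_left' (by simp)]
        have hview' : view l1 (alive.set q false) ((q + 1) % l1.length)
            = (view l1 alive p).drop (F1.length + 1) ++ (view l1 alive p).take F1.length := by
          have hv'_def : view l1 (alive.set q false) ((q + 1) % l1.length)
              = ((posList l1.length ((q + 1) % l1.length)).filter
                  (fun x => (alive.set q false).getD x false)).map (fun q => l1.getD q 0) := rfl
          rw [hv'_def, hfilter', List.map_append, hdrop1, htake1]
        have hIH := ih (k + 1) (alive.set q false) ((q + 1) % l1.length)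
          (ops + (F1.length : Int) + 1) (by omega) (by rw [List.length_set, hal])
          (Nat.mod_lt _ hn) (by rw [hfilter', List.length_append]; omega)
        have hstep : stepAlt l1 l2 (some (alive, p, ops)) k
            = some (alive.set q false, (q + 1) % l1.length, ops + (F1.length : Int) + 1) := by
          rw [stepAlt]
          simp only [PySem.List.pyGet?_natCast, hgot, hscan, hres, hdres2]
        have hslice2 : PySem.List.slice (l2.drop k) (some 1) none = l2.drop (k + 1) := by
          rw [PySem.List.slice_from_one, List.tail_drop]
        rw [hstep, ← hIH]
        rw [findOpsRec, if_neg hvne]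
        simp only [hget2, hidx]
        by_cases hz : F1.length = 0
        · rw [if_neg (by simp [hz])]
          rw [hslice2, PySem.List.slice_from_one]
          have e1 : view l1 (alive.set q false) ((q + 1) % l1.length)
              = (view l1 alive p).tail := by
            rw [hview', hz, List.drop_one, List.take_zero, List.append_nil]
          rw [e1, hz]
          norm_num
        · rw [if_pos hz]
          rw [hslice2, PySem.List.slice_from_one, rotBuild_eq _ _ hfilt_lt]
          congr 1
          rw [hview', hdropfi, hdrop1, List.cons_append, List.tail_cons]

theorem filter_replicate_range (n : Nat) :
    List.filter (fun q => (List.replicate n true).getD q false) (List.range n)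
      = List.range n := by
  rw [List.filter_eq_self]
  intro a ha
  rw [List.mem_range] at ha
  rw [List.getD_eq_getElem _ _ (by simpa using ha)]
  simp

theorem view_init (l1 : List Int) :
    view l1 (List.replicate l1.length true) 0 = l1 := by
  unfold view
  rw [posList_zero, filter_replicate_range]
  apply List.ext_getElem
  · simp
  · intro j h1 h2
    simp only [List.getElem_map, List.getElem_range]
    rw [List.getD_eq_getElem _ _ h2]

-- ===== VERDICT (by name: the statement is the Claim_ definition above) =====
theorem find_ops_spec : Claim_equal_find_ops := by
  intro l1 l2 _hdom _hpre
  unfold Spec_find_ops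
  by_cases h0 : l1.length = 0
  · have h1 : l1 = [] := List.length_eq_zero_iff.mp h0
    subst h1
    rw [find_ops, findOpsRec, if_pos rfl]
    rfl
  · have hn : 0 < l1.length := Nat.pos_of_ne_zero h0
    have hloop := loop_eq l1 l2 l1.length 0 (List.replicate l1.length true) 0 0
      (by omega) (by simp) hn
      (by rw [posList_zero, filter_replicate_range, List.length_range])
    rw [view_init, List.drop_zero] at hloop
    rw [find_ops, hloop, find_ops_alt, List.range_eq_range']
    cases hst : (List.range' 0 l1.length).foldl (stepAlt l1 l2)
        (some (List.replicate l1.length true, 0, 0)) with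
    | none => rfl
    | some st =>
      obtain ⟨av, pp, op⟩ := st
      rfl
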